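-- pv_equiv track=rewrite | github.com/thebabellibrarybot/VU_ASS | Assi_4/4bMA/utilsII.py | map_nlang_to_talks
-- ===== SOURCE A (Python) =====
-- def map_nlang_to_talks(talks_lang):
--     """
--     params
--     ------
--     map_talks_to_lang
--         dict : dict with talkid as key and list of langs as vlaue
--
--     returns
--     -------
--     map_num_translastion
--         dict : dict with num_translations as key and list of ids as value
--     """
--     nlag = {}
--     for k, v in talks_lang.items():
--         if len(v) not in nlag:
--             nlag[len(v)] = [k]
--         else:
--             nlag[len(v)].append(k)
--
--     return dict(sorted(nlag.items(), key = lambda item: item[1], reverse=True))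
-- ===== SOURCE B (Python) =====
-- def map_nlang_to_talks(talks_lang):
--     items = list(talks_lang.items())
--     nlag = {n: [k for k, v in items if len(v) == n]
--             for n in dict.fromkeys(len(v) for _, v in items)}
--     return dict(sorted(nlag.items(), key=lambda item: item[1], reverse=True))
-- ===== Notes on version B (the rewrite author's own statement) =====
-- stated objective: alternative
-- what changed: Replaces A's single-pass dict accumulation (insert-or-append per item) with a dict comprehension: ordered-dedup the language counts, then collect the ids for each distinct count with a filter pass; the final value-sorted dict construction is unchanged.
import Mathlib
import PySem

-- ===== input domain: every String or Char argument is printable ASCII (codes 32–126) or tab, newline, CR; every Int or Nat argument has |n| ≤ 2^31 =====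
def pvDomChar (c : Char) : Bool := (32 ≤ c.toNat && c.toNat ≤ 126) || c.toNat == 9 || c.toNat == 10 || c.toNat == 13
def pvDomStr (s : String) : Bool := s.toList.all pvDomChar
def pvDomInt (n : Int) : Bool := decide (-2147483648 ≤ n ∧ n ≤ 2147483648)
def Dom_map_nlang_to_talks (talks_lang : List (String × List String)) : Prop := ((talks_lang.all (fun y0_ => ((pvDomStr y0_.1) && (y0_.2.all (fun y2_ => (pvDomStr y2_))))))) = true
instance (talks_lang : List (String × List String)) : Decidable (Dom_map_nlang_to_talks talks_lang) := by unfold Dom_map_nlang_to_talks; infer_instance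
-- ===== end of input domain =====

-- B replaces A's single-pass dict accumulation by a two-pass comprehension (dedup the lengths,
-- then one filter pass per distinct length); objective: alternative decomposition, same results.

-- ===== PORT A =====
-- A: one loop over the dict items, accumulating a dict length -> list of ids, then the final sort.
def map_nlang_to_talks (talks_lang : List (String × List String)) : List (Int × List String) :=
  let nlag : PySem.Dict Int (List String) :=
    talks_lang.foldl (fun d kv =>
      if ¬ d.contains (kv.2.length : Int) then d.insert (kv.2.length : Int) [kv.1]
      else d.modify (kv.2.length : Int) [] (fun l => l ++ [kv.1])) PySem.Dict.empty
  PySem.List.sorted nlag.items (fun p => p.2) true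

-- ===== PORT B =====
-- B: dict.fromkeys over the lengths (ordered dedup), one filter pass per distinct length.
def map_nlang_to_talks_alt (talks_lang : List (String × List String)) : List (Int × List String) :=
  let items := talks_lang
  let nlag : PySem.Dict Int (List String) :=
    PySem.Dict.ofList ((PySem.List.dedup (items.map (fun kv => (kv.2.length : Int)))).map
      (fun n => (n, (items.filter (fun kv => (kv.2.length : Int) == n)).map Prod.fst)))
  PySem.List.sorted nlag.items (fun p => p.2) true

-- ===== PRECONDITION & SPEC =====
def Spec_map_nlang_to_talks (talks_lang : List (String × List String)) (out : List (Int × List String)) : Prop := out = map_nlang_to_talks_alt talks_lang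
instance (talks_lang : List (String × List String)) (out : List (Int × List String)) : Decidable (Spec_map_nlang_to_talks talks_lang out) := by unfold Spec_map_nlang_to_talks; infer_instance

-- ===== CLAIM (what is proved, stated in full; the proofs are below) =====
def Claim_equal_map_nlang_to_talks : Prop := ∀ (talks_lang : List (String × List String)), Dom_map_nlang_to_talks talks_lang → Spec_map_nlang_to_talks talks_lang (map_nlang_to_talks talks_lang)

-- ===== LEMMAS AND PROOFS =====

-- A's loop body is exactly a `modify` with default [] (the first branch inserts [k] = [] ++ [k]).
theorem stepA_eq_modify (d : PySem.Dict Int (List String)) (L : Int) (k : String) :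
    (if ¬ d.contains L then d.insert L [k] else d.modify L [] (fun l => l ++ [k]))
      = d.modify L [] (fun l => l ++ [k]) := by
  by_cases h : d.contains L = true
  · simp [h]
  · have hf : d.contains L = false := by simpa using h
    simp [h, PySem.Dict.modify, PySem.Dict.getD_of_not_contains d ([] : List String) hf]

-- The accumulated dict of A, as an item list: first-occurrence order of the lengths,
-- each paired with the ids of that length in original order.
theorem itemsA_char (tl : List (String × List String)) :
    (tl.foldl (fun d kv =>
        if ¬ d.contains (kv.2.length : Int) then d.insert (kv.2.length : Int) [kv.1]
        else d.modify (kv.2.length : Int) [] (fun l => l ++ [kv.1]))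
      (PySem.Dict.empty : PySem.Dict Int (List String))).items
    = (PySem.List.dedup (tl.map (fun kv => (kv.2.length : Int)))).map
        (fun n => (n, (tl.filter (fun kv => (kv.2.length : Int) == n)).map Prod.fst)) := by
  have hstep : (tl.foldl (fun d kv =>
        if ¬ d.contains (kv.2.length : Int) then d.insert (kv.2.length : Int) [kv.1]
        else d.modify (kv.2.length : Int) [] (fun l => l ++ [kv.1]))
      (PySem.Dict.empty : PySem.Dict Int (List String)))
      = tl.foldl (fun d kv => d.modify (kv.2.length : Int) [] (fun l => l ++ [kv.1]))
          PySem.Dict.empty := by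
    refine PySem.List.foldl_congr_mem tl _ _ _ ?_
    intro d kv _
    exact stepA_eq_modify d _ _
  rw [hstep]
  set F := tl.foldl (fun d kv => d.modify (kv.2.length : Int) [] (fun l => l ++ [kv.1]))
      (PySem.Dict.empty : PySem.Dict Int (List String)) with hF
  have hkeys : F.keys = PySem.List.dedup (tl.map (fun kv => (kv.2.length : Int))) := by
    rw [hF, PySem.Dict.keys_foldl_modify_key]
    simp [PySem.Set.update, PySem.Set.ofList_eq_foldl, PySem.Dict.keys_empty]
  have hnodup : F.keys.Nodup := by
    rw [hkeys]; exact PySem.List.nodup_dedup _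
  rw [PySem.Dict.items_eq_map_keys F hnodup [], hkeys]
  apply List.map_congr_left
  intro n _
  have hgetD : F.getD n [] = (tl.filter (fun kv => (kv.2.length : Int) == n)).map Prod.fst := by
    have := PySem.Dict.getD_foldl_modify_append
      (l := tl.map (fun kv => ((kv.2.length : Int), kv.1)))
      (d := (PySem.Dict.empty : PySem.Dict Int (List String))) (c := n)
    rw [List.foldl_map] at this
    simpa [List.filter_map, Function.comp] using this
  rw [hgetD]

-- B's literal dict is built from fresh distinct keys, so its items are the list it was built from.
theorem itemsB_char (tl : List (String × List String)) :
    (PySem.Dict.ofList ((PySem.List.dedup (tl.map (fun kv => (kv.2.length : Int)))).map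
        (fun n => (n, (tl.filter (fun kv => (kv.2.length : Int) == n)).map Prod.fst)))).items
    = (PySem.List.dedup (tl.map (fun kv => (kv.2.length : Int)))).map
        (fun n => (n, (tl.filter (fun kv => (kv.2.length : Int) == n)).map Prod.fst)) := by
  show (List.foldl (fun acc p => acc.insert p.1 p.2) (PySem.Dict.empty : PySem.Dict Int (List String))
      ((PySem.List.dedup (tl.map (fun kv => (kv.2.length : Int)))).map
        (fun n => (n, (tl.filter (fun kv => (kv.2.length : Int) == n)).map Prod.fst)))).items = _
  have := PySem.Dict.items_foldl_insert_fresh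
    (l := (PySem.List.dedup (tl.map (fun kv => (kv.2.length : Int)))).map
        (fun n => (n, (tl.filter (fun kv => (kv.2.length : Int) == n)).map Prod.fst)))
    (k := Prod.fst) (v := Prod.snd)
    (d := (PySem.Dict.empty : PySem.Dict Int (List String)))
    (by intro a _; simp [PySem.Dict.contains_empty])
    (by simp [Function.comp_def])
  simpa using this

-- ===== VERDICT (by name: the statement is the Claim_ definition above) =====
theorem map_nlang_to_talks_spec : Claim_equal_map_nlang_to_talks := by
  intro tl _
  show PySem.List.sorted
      (tl.foldl (fun d kv =>
        if ¬ d.contains (kv.2.length : Int) then d.insert (kv.2.length : Int) [kv.1]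
        else d.modify (kv.2.length : Int) [] (fun l => l ++ [kv.1]))
        (PySem.Dict.empty : PySem.Dict Int (List String))).items (fun p => p.2) true
    = PySem.List.sorted
      (PySem.Dict.ofList ((PySem.List.dedup (tl.map (fun kv => (kv.2.length : Int)))).map
        (fun n => (n, (tl.filter (fun kv => (kv.2.length : Int) == n)).map Prod.fst)))).items (fun p => p.2) true
  rw [itemsA_char, itemsB_char]
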